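-- pv_equiv track=rewrite | github.com/Leewonchan14/CodingTest | 프로그래머스/3/42892. 길 찾기 게임/길 찾기 게임.py | solution
-- ===== SOURCE A (Python) =====
-- class Node:
--     def __init__(self, value, num):
--         self.left = None
--         self.right = None
--         self.value = value
--         self.num = num
--
-- def insert(parent_node, new_node):
--     if not parent_node:
--         return new_node
--
--     if new_node.value < parent_node.value:
--         parent_node.left = insert(parent_node.left, new_node)
--     else:
--         parent_node.right = insert(parent_node.right, new_node)
--
--     return parent_node
--
-- def preorder(root, ls):
--     if not root:
--         return
--     ls.append(root.num)
--     preorder(root.left, ls)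
--     preorder(root.right, ls)
--
-- def postorder(root, ls):
--     if not root:
--         return
--     postorder(root.left, ls)
--     postorder(root.right, ls)
--     ls.append(root.num)
--
-- def solution(nodeinfo):
--     nodeinfo = [(a, *b) for a, b in enumerate(nodeinfo)]
--
--     nodeinfo.sort(key=lambda x: (-x[2], x[1]), reverse=True)
--
--     root = None
--     while nodeinfo:
--         num, value, *_ = nodeinfo.pop()
--         new_node = Node(value, num + 1)
--         root = insert(root, new_node)
--
--     result = [[], []]
--     preorder(root, result[0])
--     postorder(root, result[1])
--     return result
-- ===== SOURCE B (Python) =====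
-- # B: no tree is built -- preorder/postorder are computed directly by a
-- # quicksort-style partition recursion over the insertion sequence (alternative decomposition).
-- def build_orders(seq):
--     if not seq:
--         return [], []
--     (num, x), rest = seq[0], seq[1:]
--     left = [q for q in rest if q[1] < x]
--     right = [q for q in rest if not (q[1] < x)]
--     lpre, lpost = build_orders(left)
--     rpre, rpost = build_orders(right)
--     return [num] + lpre + rpre, lpost + rpost + [num]
--
-- def solution(nodeinfo):
--     order = sorted(enumerate(nodeinfo), key=lambda t: (-t[1][1], t[1][0]), reverse=True)[::-1]
--     seq = [(i + 1, row[0]) for i, row in order]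
--     pre, post = build_orders(seq)
--     return [pre, post]
-- ===== Notes on version B (the rewrite author's own statement) =====
-- stated objective: alternative
-- what changed: B never builds the BST: it computes preorder and postorder directly by a quicksort-style partition recursion on the insertion sequence (first element is the root, the rest split by x-coordinate), replacing A's Node class, mutating pointer insertions and mutating traversals.
import Mathlib
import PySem

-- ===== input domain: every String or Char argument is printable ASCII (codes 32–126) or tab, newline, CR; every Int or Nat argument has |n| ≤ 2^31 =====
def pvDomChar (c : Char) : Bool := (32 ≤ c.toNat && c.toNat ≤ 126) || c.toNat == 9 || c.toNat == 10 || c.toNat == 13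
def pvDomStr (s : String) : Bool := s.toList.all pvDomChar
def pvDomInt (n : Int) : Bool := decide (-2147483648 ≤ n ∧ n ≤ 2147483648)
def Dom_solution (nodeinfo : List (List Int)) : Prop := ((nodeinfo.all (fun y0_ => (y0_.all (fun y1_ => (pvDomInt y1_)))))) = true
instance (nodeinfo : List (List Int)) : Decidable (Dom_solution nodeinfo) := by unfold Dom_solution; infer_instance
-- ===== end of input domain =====

-- B computes preorder/postorder directly by a partition recursion instead of building A's BST node by node (objective: alternative/simpler; same asymptotics).

-- ===== PORT A =====
inductive PvTree
  | nil : PvTree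
  | node : Int → Int → PvTree → PvTree → PvTree
deriving DecidableEq, Repr

-- insert(parent_node, new_node): value < → left, else right
def pvInsert : PvTree → Int → Int → PvTree
  | .nil, v, n => .node v n .nil .nil
  | .node pv pn l r, v, n =>
      if v < pv then .node pv pn (pvInsert l v n) r
      else .node pv pn l (pvInsert r v n)

-- preorder(root, ls): ls is the accumulated list (Python mutates; port threads it)
def pvPreorder : PvTree → List Int → List Int
  | .nil, ls => ls
  | .node _ n l r, ls => pvPreorder r (pvPreorder l (ls ++ [n]))

def pvPostorder : PvTree → List Int → List Int
  | .nil, ls => ls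
  | .node _ n l r, ls => (pvPostorder r (pvPostorder l ls)) ++ [n]

-- while nodeinfo: num, value, *_ = nodeinfo.pop(); root = insert(root, Node(value, num+1))
def pvBuildLoop (l : List (Int × List Int)) (root : PvTree) : PvTree :=
  match h : l.getLast? with
  | none => root
  | some p => pvBuildLoop l.dropLast (pvInsert root (PySem.List.pyGetD p.2 0 0) (p.1 + 1))
termination_by l.length
decreasing_by
  have hne : l ≠ [] := by intro hnil; subst hnil; simp at h
  have : l.length - 1 < l.length := by
    cases l with
    | nil => exact absurd rfl hne
    | cons a t => simp
  simpa using this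

def solution (nodeinfo : List (List Int)) : List (List Int) :=
  -- nodeinfo = [(a, *b) for a, b in enumerate(nodeinfo)]  (variable-length tuple ported as (index, row))
  let ni := PySem.List.enumerate nodeinfo 0
  -- nodeinfo.sort(key=lambda x: (-x[2], x[1]), reverse=True)
  let ni := PySem.List.sorted2 ni (fun p => -(PySem.List.pyGetD p.2 1 0)) (fun p => PySem.List.pyGetD p.2 0 0) (reverse := true)
  let root := pvBuildLoop ni PvTree.nil
  [pvPreorder root [], pvPostorder root []]

-- ===== PORT B =====
def pvOrders : List (Int × Int) → List Int × List Int
  | [] => ([], [])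
  | (num, x) :: rest =>
      -- left = [q for q in rest if q[1] < x]; right = the others
      let lp := pvOrders (rest.filter (fun q => decide (q.2 < x)))
      let rp := pvOrders (rest.filter (fun q => !decide (q.2 < x)))
      (num :: (lp.1 ++ rp.1), (lp.2 ++ rp.2) ++ [num])
termination_by s => s.length
decreasing_by
  all_goals
    refine Nat.lt_succ_of_le ?_
    simp only [List.length_unattach]
    exact (List.length_filter_le _ _).trans (by simp)

def solution_alt (nodeinfo : List (List Int)) : List (List Int) :=
  let order := (PySem.List.sorted2 (PySem.List.enumerate nodeinfo 0) (fun p => -(PySem.List.pyGetD p.2 1 0)) (fun p => PySem.List.pyGetD p.2 0 0) (reverse := true)).reverse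
  let seq := order.map (fun p => (p.1 + 1, PySem.List.pyGetD p.2 0 0))
  let pp := pvOrders seq
  [pp.1, pp.2]

-- ===== PRECONDITION & SPEC =====
-- Pre_ excludes rows shorter than 2 entries, on which Python A raises IndexError in the sort key / unpacking.
def Pre_solution (nodeinfo : List (List Int)) : Prop := ∀ row ∈ nodeinfo, 2 ≤ row.length
instance (nodeinfo : List (List Int)) : Decidable (Pre_solution nodeinfo) := by unfold Pre_solution; infer_instance
def pvWitness_solution : List (List Int) := [[5, 3], [11, 5], [13, 3], [3, 5], [6, 1]]

def Spec_solution (nodeinfo : List (List Int)) (out : List (List Int)) : Prop := out = solution_alt nodeinfo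
instance (nodeinfo : List (List Int)) (out : List (List Int)) : Decidable (Spec_solution nodeinfo out) := by unfold Spec_solution; infer_instance

-- ===== CLAIM (what is proved, stated in full; the proofs are below) =====
def Claim_equal_solution : Prop := ∀ (nodeinfo : List (List Int)), Dom_solution nodeinfo → Pre_solution nodeinfo → Spec_solution nodeinfo (solution nodeinfo)

-- ===== LEMMAS AND PROOFS =====

-- the fold A's while/pop loop amounts to
def pvBuildT (s : List (Int × Int)) (t : PvTree) : PvTree :=
  s.foldl (fun t p => pvInsert t p.2 p.1) t

theorem pvBuildLoop_eq (l : List (Int × List Int)) (t : PvTree) :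
    pvBuildLoop l t =
      pvBuildT (l.reverse.map (fun p => (p.1 + 1, PySem.List.pyGetD p.2 0 0))) t := by
  induction l using List.reverseRecOn generalizing t with
  | nil => simp [pvBuildLoop, pvBuildT]
  | append_singleton xs x ih =>
      rw [pvBuildLoop]
      split
      · rename_i h
        simp at h
      · rename_i p h
        have hp : p = x := by simpa using h.symm
        subst hp
        simp only [List.dropLast_concat]
        rw [ih]
        simp [pvBuildT]

theorem pvBuildT_node (s : List (Int × Int)) (v n : Int) (l r : PvTree) :
    pvBuildT s (.node v n l r) =
      .node v n (pvBuildT (s.filter (fun q => decide (q.2 < v))) l)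
                (pvBuildT (s.filter (fun q => !decide (q.2 < v))) r) := by
  induction s generalizing l r with
  | nil => simp [pvBuildT]
  | cons p s ih =>
      by_cases h : p.2 < v
      · have h1 : pvBuildT (p :: s) (.node v n l r)
            = pvBuildT s (.node v n (pvInsert l p.2 p.1) r) := by
          simp [pvBuildT, pvInsert, h]
        rw [h1, ih, List.filter_cons, List.filter_cons]
        simp [h, pvBuildT]
      · have h1 : pvBuildT (p :: s) (.node v n l r)
            = pvBuildT s (.node v n l (pvInsert r p.2 p.1)) := by
          simp [pvBuildT, pvInsert, h]
        rw [h1, ih, List.filter_cons, List.filter_cons]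
        simp [h, pvBuildT]

theorem pvPreorder_acc (t : PvTree) (acc : List Int) :
    pvPreorder t acc = acc ++ pvPreorder t [] := by
  induction t generalizing acc with
  | nil => simp [pvPreorder]
  | node v n l r ihl ihr =>
      simp only [pvPreorder]
      rw [ihl (acc ++ [n]), ihr ((acc ++ [n]) ++ pvPreorder l []), ihl ([] ++ [n]), ihr (([] ++ [n]) ++ pvPreorder l [])]
      simp

theorem pvPostorder_acc (t : PvTree) (acc : List Int) :
    pvPostorder t acc = acc ++ pvPostorder t [] := by
  induction t generalizing acc with
  | nil => simp [pvPostorder]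
  | node v n l r ihl ihr =>
      simp only [pvPostorder]
      rw [ihl acc, ihr (acc ++ pvPostorder l []), ihr (pvPostorder l [])]
      simp

theorem pvPre_node (v n : Int) (l r : PvTree) (acc : List Int) :
    pvPreorder (.node v n l r) acc = acc ++ [n] ++ pvPreorder l [] ++ pvPreorder r [] := by
  simp only [pvPreorder]
  rw [pvPreorder_acc l (acc ++ [n]), pvPreorder_acc r]

theorem pvPost_node (v n : Int) (l r : PvTree) (acc : List Int) :
    pvPostorder (.node v n l r) acc = acc ++ pvPostorder l [] ++ pvPostorder r [] ++ [n] := by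
  simp only [pvPostorder]
  rw [pvPostorder_acc l acc, pvPostorder_acc r]

theorem pvOrders_eq (s : List (Int × Int)) :
    pvOrders s = (pvPreorder (pvBuildT s .nil) [], pvPostorder (pvBuildT s .nil) []) := by
  induction hn : s.length using Nat.strong_induction_on generalizing s with
  | _ n ih =>
    cases s with
    | nil => simp [pvOrders, pvBuildT, pvPreorder, pvPostorder]
    | cons p rest =>
        obtain ⟨num, x⟩ := p
        have hbuild : pvBuildT ((num, x) :: rest) .nil =
            .node x num (pvBuildT (rest.filter (fun q => decide (q.2 < x))) .nil)
                        (pvBuildT (rest.filter (fun q => !decide (q.2 < x))) .nil) := by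
          show pvBuildT rest (pvInsert .nil x num) = _
          rw [show pvInsert .nil x num = .node x num .nil .nil from rfl, pvBuildT_node]
        have hl : (rest.filter (fun q => decide (q.2 < x))).length < n := by
          subst hn; exact Nat.lt_succ_of_le (List.length_filter_le _ _)
        have hr : (rest.filter (fun q => !decide (q.2 < x))).length < n := by
          subst hn; exact Nat.lt_succ_of_le (List.length_filter_le _ _)
        have ihl := ih _ hl (s := rest.filter (fun q => decide (q.2 < x))) rfl
        have ihr := ih _ hr (s := rest.filter (fun q => !decide (q.2 < x))) rfl
        rw [hbuild]
        simp only [pvOrders, ihl, ihr, pvPre_node, pvPost_node, Prod.mk.injEq]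
        simp

-- ===== VERDICT (by name: the statement is the Claim_ definition above) =====
theorem solution_spec : Claim_equal_solution := by
  intro nodeinfo _ _
  show solution nodeinfo = solution_alt nodeinfo
  unfold solution solution_alt
  dsimp only
  rw [pvBuildLoop_eq, pvOrders_eq]
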